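-- pv_equiv track=rewrite | github.com/nardogod/rag3det | src/rag/sistema_completo_3dt.py | _nivel_por_xp
-- ===== SOURCE A (Python) =====
-- def _nivel_por_xp(xp: int) -> int:
--     """Converte XP para nivel."""
--     tabela = [
--         0, 1000, 3000, 6000, 10000,
--         15000, 21000, 28000, 36000, 45000,
--     ]
--     nivel = 1
--     for i, xp_nivel in enumerate(tabela[1:], 2):
--         if xp >= xp_nivel:
--             nivel = i
--     return min(nivel, 10)
-- ===== SOURCE B (Python) =====
-- def _nivel_por_xp(xp: int) -> int:
--     """Converte XP para nivel (busca binaria sobre os limiares)."""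
--     limiares = [1000, 3000, 6000, 10000, 15000, 21000, 28000, 36000, 45000]
--     lo, hi = 0, len(limiares)
--     while lo < hi:
--         mid = (lo + hi) // 2
--         if xp < limiares[mid]:
--             hi = mid
--         else:
--             lo = mid + 1
--     return 1 + lo
-- ===== Notes on version B (the rewrite author's own statement) =====
-- stated objective: idiomatic
-- what changed: Replaced the linear enumerate-scan over the threshold table by a hand-written binary search (bisect_right) over the upper thresholds, returning the insertion point plus one with no clamp needed.
import Mathlib
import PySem

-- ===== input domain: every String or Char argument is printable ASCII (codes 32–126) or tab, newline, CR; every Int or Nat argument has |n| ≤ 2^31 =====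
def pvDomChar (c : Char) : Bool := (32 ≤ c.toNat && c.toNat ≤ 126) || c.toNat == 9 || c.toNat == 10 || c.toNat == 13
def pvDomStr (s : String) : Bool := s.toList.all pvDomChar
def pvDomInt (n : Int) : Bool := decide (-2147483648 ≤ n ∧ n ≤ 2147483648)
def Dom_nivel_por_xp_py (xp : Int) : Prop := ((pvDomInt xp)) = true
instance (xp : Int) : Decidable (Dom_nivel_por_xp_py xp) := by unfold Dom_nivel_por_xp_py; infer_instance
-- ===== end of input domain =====

-- B re-implements the XP→level lookup as a binary search over the per-level
-- thresholds instead of A's linear scan (objective: idiomatic/alternative; same return value).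
-- ===== PORT A =====
def nivel_por_xp_py (xp : Int) : Int :=
  let tabela : List Int := [0, 1000, 3000, 6000, 10000, 15000, 21000, 28000, 36000, 45000]
  -- for i, xp_nivel in enumerate(tabela[1:], 2): if xp >= xp_nivel: nivel = i
  let nivel : Int :=
    ((tabela.drop 1).foldl (fun (st : Int × Int) t => (st.1 + 1, if xp ≥ t then st.1 else st.2)) (2, 1)).2
  min nivel 10

-- ===== PORT B =====
-- while lo < hi: mid = (lo+hi)//2; if xp < limiares[mid]: hi = mid else: lo = mid+1
-- (fuel = initial interval width, a pure totality guard: the loop runs at most hi-lo times)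
def bisectGo (lim : List Int) (xp : Int) : Nat → Nat → Nat → Nat
  | 0, lo, _ => lo
  | fuel + 1, lo, hi =>
    if lo < hi then
      let mid := (lo + hi) / 2
      if xp < lim.getD mid 0 then bisectGo lim xp fuel lo mid
      else bisectGo lim xp fuel (mid + 1) hi
    else lo

def pvLim : List Int := [1000, 3000, 6000, 10000, 15000, 21000, 28000, 36000, 45000]

def nivel_por_xp_py_alt (xp : Int) : Int :=
  1 + (bisectGo pvLim xp pvLim.length 0 pvLim.length : Int)

-- ===== PRECONDITION & SPEC =====
def Spec_nivel_por_xp_py (xp : Int) (out : Int) : Prop := out = nivel_por_xp_py_alt xp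
instance (xp : Int) (out : Int) : Decidable (Spec_nivel_por_xp_py xp out) := by unfold Spec_nivel_por_xp_py; infer_instance

-- ===== CLAIM (what is proved, stated in full; the proofs are below) =====
def Claim_equal_nivel_por_xp_py : Prop := ∀ (xp : Int), Dom_nivel_por_xp_py xp → Spec_nivel_por_xp_py xp (nivel_por_xp_py xp)

-- ===== LEMMAS AND PROOFS =====
lemma bstep (lim : List Int) (xp : Int) (fuel lo hi : Nat) :
    bisectGo lim xp (fuel + 1) lo hi =
    if lo < hi then
      (if xp < lim.getD ((lo + hi) / 2) 0 then bisectGo lim xp fuel lo ((lo + hi) / 2)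
       else bisectGo lim xp fuel ((lo + hi) / 2 + 1) hi)
    else lo := by
  rw [bisectGo]

lemma ebase (lim : List Int) (xp : Int) (f k : Nat) : bisectGo lim xp f k k = k := by
  cases f with
  | zero => rfl
  | succ f => rw [bstep]; simp

lemma e09 (xp : Int) : bisectGo pvLim xp 9 0 9 =
    if xp < 15000 then bisectGo pvLim xp 8 0 4 else bisectGo pvLim xp 8 5 9 := by
  rw [(by norm_num : (9:Nat) = 8 + 1), bstep]; norm_num [pvLim]

lemma e04 (xp : Int) : bisectGo pvLim xp 8 0 4 =
    if xp < 6000 then bisectGo pvLim xp 7 0 2 else bisectGo pvLim xp 7 3 4 := by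
  rw [(by norm_num : (8:Nat) = 7 + 1), bstep]; norm_num [pvLim]

lemma e02 (xp : Int) : bisectGo pvLim xp 7 0 2 =
    if xp < 3000 then bisectGo pvLim xp 6 0 1 else bisectGo pvLim xp 6 2 2 := by
  rw [(by norm_num : (7:Nat) = 6 + 1), bstep]; norm_num [pvLim]

lemma e01 (xp : Int) : bisectGo pvLim xp 6 0 1 =
    if xp < 1000 then bisectGo pvLim xp 5 0 0 else bisectGo pvLim xp 5 1 1 := by
  rw [(by norm_num : (6:Nat) = 5 + 1), bstep]; norm_num [pvLim]

lemma e34 (xp : Int) : bisectGo pvLim xp 7 3 4 =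
    if xp < 10000 then bisectGo pvLim xp 6 3 3 else bisectGo pvLim xp 6 4 4 := by
  rw [(by norm_num : (7:Nat) = 6 + 1), bstep]; norm_num [pvLim]

lemma e59 (xp : Int) : bisectGo pvLim xp 8 5 9 =
    if xp < 36000 then bisectGo pvLim xp 7 5 7 else bisectGo pvLim xp 7 8 9 := by
  rw [(by norm_num : (8:Nat) = 7 + 1), bstep]; norm_num [pvLim]

lemma e57 (xp : Int) : bisectGo pvLim xp 7 5 7 =
    if xp < 28000 then bisectGo pvLim xp 6 5 6 else bisectGo pvLim xp 6 7 7 := by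
  rw [(by norm_num : (7:Nat) = 6 + 1), bstep]; norm_num [pvLim]

lemma e56 (xp : Int) : bisectGo pvLim xp 6 5 6 =
    if xp < 21000 then bisectGo pvLim xp 5 5 5 else bisectGo pvLim xp 5 6 6 := by
  rw [(by norm_num : (6:Nat) = 5 + 1), bstep]; norm_num [pvLim]

lemma e89 (xp : Int) : bisectGo pvLim xp 7 8 9 =
    if xp < 45000 then bisectGo pvLim xp 6 8 8 else bisectGo pvLim xp 6 9 9 := by
  rw [(by norm_num : (7:Nat) = 6 + 1), bstep]; norm_num [pvLim]

theorem nivel_por_xp_py_spec : Claim_equal_nivel_por_xp_py := by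
  intro xp _
  unfold Spec_nivel_por_xp_py nivel_por_xp_py nivel_por_xp_py_alt
  have hlen : pvLim.length = 9 := by norm_num [pvLim]
  rw [hlen, e09, e04, e02, e01, e34, e59, e57, e56, e89]
  simp only [ebase, List.drop, List.foldl_cons, List.foldl_nil]
  split_ifs <;> omega
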